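-- pv_equiv track=rewrite | github.com/sirji-ai/sirji | messages/sirji_messages/parser.py | _parse_steps
-- ===== SOURCE A (Python) =====
-- def _parse_steps(parsed_message):
--     details = parsed_message.get("DETAILS", "")
--     parsed_steps = []
--
--     if any(line.strip().startswith("Step") for line in details.split("\n")):
--         current_step_number = None
--         current_step_description = ""
--         for line in details.split("\n"):
--             line = line.strip()
--             if line.startswith("Step"):
--                 if current_step_number is not None:
--                     parsed_steps.append(
--                         {"step": current_step_number.strip(), "description": current_step_description.strip()})
--                 current_step_number, current_step_description = [part.strip() for part in line.split(":", 1)]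
--             else:
--                 current_step_description += f"\n{line}"
--         if current_step_number is not None:
--             parsed_steps.append({"step": current_step_number.strip(),
--                                 "description": current_step_description.strip()})
--     else:
--         step_number = 1
--         for line in details.split("\n"):
--             line = line.strip()
--             if line:
--                 parsed_steps.append({"step": f"Step {step_number}", "description": line})
--                 step_number += 1
--
--     return parsed_steps
-- ===== SOURCE B (Python) =====
-- def _parse_steps(parsed_message):
--     details = parsed_message.get("DETAILS", "")
--     lines = [l.strip() for l in details.split("\n")]
--
--     if not any(l.startswith("Step") for l in lines):
--         return [{"step": "Step " + str(i), "description": l}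
--                 for i, l in enumerate([l for l in lines if l], 1)]
--
--     # partition: a new group at each 'Step' header; lines before the first header are dropped
--     groups = []
--     for l in lines:
--         if l.startswith("Step"):
--             groups.append([l])
--         elif groups:
--             groups[-1].append(l)
--
--     result = []
--     for header, *rest in groups:
--         step, desc = header.split(":", 1)
--         result.append({"step": step.strip(),
--                        "description": "\n".join([desc.strip()] + rest).strip()})
--     return result
-- ===== Notes on version B (the rewrite author's own statement) =====
-- stated objective: alternative
-- what changed: A's single accumulate-and-flush pass with mutable (current step, current description) state is replaced by an explicit partition of the stripped lines into header-led groups followed by a map that renders each group into a step dict (and the no-header branch by enumerate over the filtered non-empty lines).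
import Mathlib
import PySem

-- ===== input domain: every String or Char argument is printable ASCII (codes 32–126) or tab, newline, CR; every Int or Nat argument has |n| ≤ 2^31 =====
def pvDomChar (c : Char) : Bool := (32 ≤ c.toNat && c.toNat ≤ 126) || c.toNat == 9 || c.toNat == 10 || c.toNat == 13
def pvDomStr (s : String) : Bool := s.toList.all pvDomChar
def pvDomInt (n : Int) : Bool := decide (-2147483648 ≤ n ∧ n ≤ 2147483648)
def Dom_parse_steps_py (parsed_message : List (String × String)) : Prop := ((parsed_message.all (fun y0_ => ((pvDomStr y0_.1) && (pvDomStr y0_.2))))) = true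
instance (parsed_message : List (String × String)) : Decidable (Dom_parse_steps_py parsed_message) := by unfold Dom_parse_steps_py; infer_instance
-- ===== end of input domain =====

-- B replaces A's accumulate-and-flush pass by a partition of the lines into header-led
-- groups followed by a per-group rendering map (objective: alternative decomposition).

-- ===== PORT A =====
-- A's flush: emit the pending (step, description) pair, if a step is open
def pvFlushA (cur : Option String) (desc : String)
    (acc : List (List (String × String))) : List (List (String × String)) :=
  match cur with
  | some n => acc ++ [[("step", PySem.Str.strip n), ("description", PySem.Str.strip desc)]]
  | none => acc

-- one iteration of A's accumulate-and-flush loop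
def pvStepA (st : Option String × String × List (List (String × String)))
    (line : String) : Option String × String × List (List (String × String)) :=
  let l := PySem.Str.strip line
  if PySem.Str.startswith l "Step" then
    -- line.split(":", 1) unpacked into two parts; Pre_ excludes a colon-less
    -- 'Step' header, on which Python raises ValueError
    let parts := ((PySem.Str.splitMax? l ":" 1).getD []).map PySem.Str.strip
    (some (parts.getD 0 ""), parts.getD 1 "", pvFlushA st.1 st.2.1 st.2.2)
  else
    (st.1, st.2.1 ++ "\n" ++ l, st.2.2)

-- one iteration of A's numbering loop (the branch with no 'Step' header)
def pvStepNumA (st : Int × List (List (String × String))) (line : String) :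
    Int × List (List (String × String)) :=
  let l := PySem.Str.strip line
  if l ≠ "" then
    (st.1 + 1, st.2 ++ [[("step", "Step " ++ PySem.Int.toStr st.1), ("description", l)]])
  else st

def parse_steps_py (parsed_message : List (String × String)) : List (List (String × String)) :=
  let details := (PySem.Dict.mk parsed_message).getD "DETAILS" ""
  let lines := (PySem.Str.split? details "\n").getD []
  if lines.any (fun line => PySem.Str.startswith (PySem.Str.strip line) "Step") then
    let st := lines.foldl pvStepA (none, "", [])
    pvFlushA st.1 st.2.1 st.2.2
  else
    (lines.foldl pvStepNumA (1, [])).2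

-- ===== PORT B =====
-- start a new group at each 'Step' header; other lines join the open group (none: dropped)
def pvGroupStep (gs : List (List String)) (l : String) : List (List String) :=
  if PySem.Str.startswith l "Step" then gs ++ [[l]]
  else if gs.isEmpty then gs
  else gs.dropLast ++ [gs.getLastD [] ++ [l]]

-- render one group as a step dict
def pvRenderB (g : List String) : List (String × String) :=
  match g with
  | [] => []  -- unreachable: every group starts with its header
  | header :: rest =>
    let parts := (PySem.Str.splitMax? header ":" 1).getD []
    [("step", PySem.Str.strip (parts.getD 0 "")),
     ("description", PySem.Str.strip
        (PySem.Str.join "\n" (PySem.Str.strip (parts.getD 1 "") :: rest)))]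

def parse_steps_py_alt (parsed_message : List (String × String)) : List (List (String × String)) :=
  let details := (PySem.Dict.mk parsed_message).getD "DETAILS" ""
  let lines := ((PySem.Str.split? details "\n").getD []).map PySem.Str.strip
  if !(lines.any (fun l => PySem.Str.startswith l "Step")) then
    (PySem.List.enumerate (lines.filter (fun l => l ≠ "")) 1).map
      (fun p => [("step", "Step " ++ PySem.Int.toStr p.1), ("description", p.2)])
  else
    (lines.foldl pvGroupStep []).map pvRenderB

-- ===== PRECONDITION & SPEC =====
-- Pre_ excludes exactly the inputs on which A raises ValueError: a line whose stripped
-- form starts with 'Step' but contains no ':' (the 2-way unpack of line.split(':', 1)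
-- fails there; B raises on the same inputs).
def Pre_parse_steps_py (parsed_message : List (String × String)) : Prop :=
  (((PySem.Str.split? ((PySem.Dict.mk parsed_message).getD "DETAILS" "") "\n").getD []).all
    (fun line => !(PySem.Str.startswith (PySem.Str.strip line) "Step")
                 || PySem.Str.isIn ":" (PySem.Str.strip line))) = true
instance (parsed_message : List (String × String)) : Decidable (Pre_parse_steps_py parsed_message) := by
  unfold Pre_parse_steps_py; infer_instance

def pvWitness_parse_steps_py : (List (String × String)) :=
  [("DETAILS", "Step 1: do x\n  more\n\nStep 2 : done")]

def Spec_parse_steps_py (parsed_message : List (String × String)) (out : List (List (String × String))) : Prop := out = parse_steps_py_alt parsed_message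
instance (parsed_message : List (String × String)) (out : List (List (String × String))) : Decidable (Spec_parse_steps_py parsed_message out) := by unfold Spec_parse_steps_py; infer_instance

-- ===== CLAIM (what is proved, stated in full; the proofs are below) =====
def Claim_equal_parse_steps_py : Prop := ∀ (parsed_message : List (String × String)), Dom_parse_steps_py parsed_message → Pre_parse_steps_py parsed_message → Spec_parse_steps_py parsed_message (parse_steps_py parsed_message)

-- ===== LEMMAS AND PROOFS =====

-- strip is idempotent -----------------------------------------------------------
lemma pvDropWhile_eq_self_of_prefix {p : Char → Bool} {u t : List Char}
    (hu : u <+: t) (ht : t.dropWhile p = t) : u.dropWhile p = u := by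
  cases u with
  | nil => simp
  | cons a u' =>
    obtain ⟨k, rfl⟩ := hu
    by_cases hp : p a
    · exfalso
      have h1 := List.length_dropWhile_le p (u' ++ k)
      rw [List.cons_append, List.dropWhile_cons_of_pos hp] at ht
      rw [ht] at h1
      simp at h1
    · simp [List.dropWhile_cons_of_neg hp]

lemma pvRstrip_prefix (t : List Char) : PySem.Chars.rstrip t <+: t := by
  have h := List.dropWhile_suffix (l := t.reverse) PySem.Chars.isspace
  have h2 := (List.reverse_prefix
      (l₁ := t.reverse.dropWhile PySem.Chars.isspace) (l₂ := t.reverse)).mpr h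
  rw [List.reverse_reverse] at h2
  exact h2

lemma pvChars_strip_strip (s : List Char) :
    PySem.Chars.strip (PySem.Chars.strip s) = PySem.Chars.strip s := by
  have hlt : (PySem.Chars.lstrip s).dropWhile PySem.Chars.isspace = PySem.Chars.lstrip s := by
    simp [PySem.Chars.lstrip, List.dropWhile_idempotent]
  have h1 : PySem.Chars.lstrip (PySem.Chars.rstrip (PySem.Chars.lstrip s))
      = PySem.Chars.rstrip (PySem.Chars.lstrip s) :=
    pvDropWhile_eq_self_of_prefix (pvRstrip_prefix _) hlt
  have h2 : ∀ u, PySem.Chars.rstrip (PySem.Chars.rstrip u) = PySem.Chars.rstrip u := by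
    intro u
    simp [PySem.Chars.rstrip, List.dropWhile_idempotent]
  simp [PySem.Chars.strip, h1, h2]

lemma pvStrip_strip (s : String) :
    PySem.Str.strip (PySem.Str.strip s) = PySem.Str.strip s := by
  simp [PySem.Str.strip, String.toList_ofList, pvChars_strip_strip]

-- join "\n" (d :: rest) is A's repeated '+= "\n" + line' ------------------------
lemma pvJoin_cons_append (sep a b : List Char) (r : List (List Char)) :
    PySem.Chars.join sep ((a ++ b) :: r) = a ++ PySem.Chars.join sep (b :: r) := by
  induction r generalizing a b with
  | nil => simp [PySem.Chars.join_singleton]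
  | cons c r' _ =>
    rw [PySem.Chars.join_cons_cons, PySem.Chars.join_cons_cons]
    simp [List.append_assoc]

lemma pvStrJoinFold (rest : List String) : ∀ d : String,
    PySem.Str.join "\n" (d :: rest) = rest.foldl (fun a l => a ++ "\n" ++ l) d := by
  induction rest with
  | nil =>
    intro d
    simp [PySem.Str.join, PySem.Chars.join_singleton, String.ofList_toList]
  | cons l r ih =>
    intro d
    rw [List.foldl_cons, ← ih (d ++ "\n" ++ l)]
    apply String.toList_inj.mp
    simp only [PySem.Str.join, String.toList_ofList, List.map_cons, String.toList_append]
    rw [show (d.toList ++ "\n".toList ++ l.toList)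
          = (d.toList ++ "\n".toList) ++ l.toList by simp [List.append_assoc]]
    rw [pvJoin_cons_append]
    simp [PySem.Chars.join_cons_cons, List.append_assoc]

-- mapping strip over split parts, read with getD --------------------------------
lemma pvGetDMapStrip (parts : List String) (i : Nat) :
    (parts.map PySem.Str.strip).getD i "" = PySem.Str.strip (parts.getD i "") := by
  have h0 : PySem.Str.strip "" = "" := by decide
  calc (parts.map PySem.Str.strip).getD i ""
      = (parts.map PySem.Str.strip).getD i (PySem.Str.strip "") := by rw [h0]
    _ = PySem.Str.strip (parts.getD i "") := List.getD_map parts "" PySem.Str.strip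

-- the value A keeps as current step header / initial description for header h ---
def pvCurOf (h : String) : String :=
  (((PySem.Str.splitMax? h ":" 1).getD []).map PySem.Str.strip).getD 0 ""
def pvDesc0 (h : String) : String :=
  (((PySem.Str.splitMax? h ":" 1).getD []).map PySem.Str.strip).getD 1 ""
def pvDescOf (h : String) (rest : List String) : String :=
  rest.foldl (fun a l => a ++ "\n" ++ l) (pvDesc0 h)

-- rendering a group equals flushing A's state for that group --------------------
lemma pvRender_eq (h : String) (rest : List String) :
    pvRenderB (h :: rest)
      = [("step", PySem.Str.strip (pvCurOf h)),
         ("description", PySem.Str.strip (pvDescOf h rest))] := by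
  simp only [pvRenderB, pvCurOf, pvDescOf, pvDesc0, pvGetDMapStrip, pvStrip_strip,
    pvStrJoinFold]

lemma pvGroupStep_concat (gs : List (List String)) (g : List String) (l : String)
    (hc : ¬ PySem.Str.startswith l "Step" = true) :
    pvGroupStep (gs ++ [g]) l = gs ++ [g ++ [l]] := by
  unfold pvGroupStep
  rw [if_neg hc, if_neg (by simp)]
  rw [List.dropLast_concat, List.getLastD_concat]

lemma pvFlush_some (h : String) (rest : List String) (pre : List (List String)) :
    pvFlushA (some (pvCurOf h)) (pvDescOf h rest) (pre.map pvRenderB)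
      = ((pre ++ [h :: rest]).map pvRenderB) := by
  rw [List.map_append]
  simp [pvFlushA, pvRender_eq]

-- main loop invariant: A's flush of the fold = B's grouped map ------------------
lemma pvP2 (L : List String) : ∀ (pre : List (List String)) (h : String) (rest : List String),
    pvFlushA
      (L.foldl pvStepA (some (pvCurOf h), pvDescOf h rest, pre.map pvRenderB)).1
      (L.foldl pvStepA (some (pvCurOf h), pvDescOf h rest, pre.map pvRenderB)).2.1
      (L.foldl pvStepA (some (pvCurOf h), pvDescOf h rest, pre.map pvRenderB)).2.2
      = (L.foldl (fun gs line => pvGroupStep gs (PySem.Str.strip line))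
          (pre ++ [h :: rest])).map pvRenderB := by
  induction L with
  | nil =>
    intro pre h rest
    rw [List.foldl_nil, List.foldl_nil]
    exact pvFlush_some h rest pre
  | cons l L ih =>
    intro pre h rest
    by_cases hc : PySem.Str.startswith (PySem.Str.strip l) "Step" = true
    · have hstep : pvStepA (some (pvCurOf h), pvDescOf h rest, pre.map pvRenderB) l
          = (some (pvCurOf (PySem.Str.strip l)), pvDescOf (PySem.Str.strip l) [],
             pvFlushA (some (pvCurOf h)) (pvDescOf h rest) (pre.map pvRenderB)) := by
        simp only [pvStepA]
        rw [if_pos hc]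
        simp only [pvCurOf, pvDescOf, pvDesc0, List.foldl_nil]
      have hg : pvGroupStep (pre ++ [h :: rest]) (PySem.Str.strip l)
          = (pre ++ [h :: rest]) ++ [(PySem.Str.strip l) :: ([] : List String)] := by
        simp only [pvGroupStep]
        rw [if_pos hc]
      rw [List.foldl_cons, hstep, pvFlush_some h rest pre, List.foldl_cons, hg]
      exact ih (pre ++ [h :: rest]) (PySem.Str.strip l) []
    · have hstep : pvStepA (some (pvCurOf h), pvDescOf h rest, pre.map pvRenderB) l
          = (some (pvCurOf h), pvDescOf h (rest ++ [PySem.Str.strip l]),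
             pre.map pvRenderB) := by
        simp only [pvStepA]
        rw [if_neg hc]
        rw [show pvDescOf h rest ++ "\n" ++ PySem.Str.strip l
              = pvDescOf h (rest ++ [PySem.Str.strip l]) by
            rw [pvDescOf, pvDescOf, List.foldl_concat]]
      rw [List.foldl_cons, hstep, List.foldl_cons,
        pvGroupStep_concat _ _ _ hc,
        show (h :: rest) ++ [PySem.Str.strip l] = h :: (rest ++ [PySem.Str.strip l]) by simp]
      exact ih pre h (rest ++ [PySem.Str.strip l])

lemma pvP1 (L : List String) : ∀ d : String,
    pvFlushA (L.foldl pvStepA (none, d, [])).1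
      (L.foldl pvStepA (none, d, [])).2.1 (L.foldl pvStepA (none, d, [])).2.2
      = (L.foldl (fun gs line => pvGroupStep gs (PySem.Str.strip line)) []).map pvRenderB := by
  induction L with
  | nil => intro d; simp [pvFlushA]
  | cons l L ih =>
    intro d
    by_cases hc : PySem.Str.startswith (PySem.Str.strip l) "Step" = true
    · have hstep : pvStepA (none, d, ([] : List (List (String × String)))) l
          = (some (pvCurOf (PySem.Str.strip l)), pvDescOf (PySem.Str.strip l) [],
             (([] : List (List String)).map pvRenderB)) := by
        simp only [pvStepA]
        rw [if_pos hc]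
        simp only [pvCurOf, pvDescOf, pvDesc0, List.foldl_nil, pvFlushA, List.map_nil]
      have hg : pvGroupStep [] (PySem.Str.strip l)
          = ([] : List (List String)) ++ [(PySem.Str.strip l) :: ([] : List String)] := by
        simp only [pvGroupStep]
        rw [if_pos hc]
      rw [List.foldl_cons, hstep, List.foldl_cons, hg]
      exact pvP2 L [] (PySem.Str.strip l) []
    · have hstep : pvStepA (none, d, ([] : List (List (String × String)))) l
          = (none, d ++ "\n" ++ PySem.Str.strip l, []) := by
        simp only [pvStepA]
        rw [if_neg hc]
      have hg : pvGroupStep [] (PySem.Str.strip l) = [] := by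
        simp only [pvGroupStep]
        rw [if_neg hc]
        simp
      rw [List.foldl_cons, hstep, List.foldl_cons, hg]
      exact ih _

-- the numbering branch ----------------------------------------------------------
lemma pvP3 (L : List String) : ∀ (n : Int) (acc : List (List (String × String))),
    (L.foldl pvStepNumA (n, acc)).2
      = acc ++ (PySem.List.enumerate ((L.map PySem.Str.strip).filter (fun l => l ≠ "")) n).map
          (fun p => [("step", "Step " ++ PySem.Int.toStr p.1), ("description", p.2)]) := by
  induction L with
  | nil => intro n acc; simp
  | cons l L ih =>
    intro n acc
    by_cases hl : PySem.Str.strip l = ""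
    · have hstep : pvStepNumA (n, acc) l = (n, acc) := by
        simp only [pvStepNumA]
        rw [if_neg (fun h => h hl)]
      rw [List.foldl_cons, hstep, ih]
      simp [hl]
    · have hstep : pvStepNumA (n, acc) l
          = (n + 1, acc ++ [[("step", "Step " ++ PySem.Int.toStr n),
              ("description", PySem.Str.strip l)]]) := by
        simp only [pvStepNumA]
        rw [if_pos hl]
      rw [List.foldl_cons, hstep, ih]
      rw [List.map_cons, List.filter_cons_of_pos (by simpa using hl)]
      rw [show PySem.List.enumerate (PySem.Str.strip l ::
            (L.map PySem.Str.strip).filter (fun l => l ≠ "")) n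
          = (n, PySem.Str.strip l) :: PySem.List.enumerate
              ((L.map PySem.Str.strip).filter (fun l => l ≠ "")) (n + 1) by
        simp [PySem.List.enumerate]]
      simp [List.append_assoc]

-- ===== VERDICT (by name: the statement is the Claim_ definition above) =====
theorem parse_steps_py_spec : Claim_equal_parse_steps_py := by
  intro pm _hdom _hpre
  unfold Spec_parse_steps_py parse_steps_py parse_steps_py_alt
  dsimp only
  have hany : ((((PySem.Str.split? ((PySem.Dict.mk pm).getD "DETAILS" "") "\n").getD
        []).map PySem.Str.strip).any (fun l => PySem.Str.startswith l "Step"))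
      = (((PySem.Str.split? ((PySem.Dict.mk pm).getD "DETAILS" "") "\n").getD []).any
          (fun line => PySem.Str.startswith (PySem.Str.strip line) "Step")) := by
    rw [List.any_map]; rfl
  by_cases hc : (((PySem.Str.split? ((PySem.Dict.mk pm).getD "DETAILS" "") "\n").getD []).any
      (fun line => PySem.Str.startswith (PySem.Str.strip line) "Step")) = true
  · rw [if_pos hc, hany, hc, Bool.not_true, if_neg (by simp)]
    rw [List.foldl_map]
    exact pvP1 _ ""
  · have hc' : (((PySem.Str.split? ((PySem.Dict.mk pm).getD "DETAILS" "") "\n").getD []).any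
        (fun line => PySem.Str.startswith (PySem.Str.strip line) "Step")) = false := by
      simpa using hc
    rw [if_neg hc, hany, hc', Bool.not_false, if_pos rfl]
    rw [pvP3 _ 1 []]
    simp
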